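-- pv_equiv track=rewrite | github.com/YAZDANNIK/face-clustering-utility | cluster_faces.py | assign_labels_to_images
-- ===== SOURCE A (Python) =====
-- from collections import Counter
--
-- def assign_labels_to_images(records, labels):
--     by_image = {}
--     for (path, _), lab in zip(records, labels):
--         by_image.setdefault(path, []).append(lab)
--     assignment = {}
--     for path, labs in by_image.items():
--         filtered = [l for l in labs if l != -1]
--         if filtered:
--             assignment[path] = Counter(filtered).most_common(1)[0][0]
--         else:
--             assignment[path] = -1
--     return assignment
-- ===== SOURCE B (Python) =====
-- def assign_labels_to_images(records, labels):
--     pairs = [(path, lab) for (path, _), lab in zip(records, labels)]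
--     assignment = {}
--     for path, _ in pairs:
--         if path in assignment:
--             continue
--         labs = [l for q, l in pairs if q == path and l != -1]
--         cands = list(dict.fromkeys(labs))
--         assignment[path] = max(cands, key=labs.count, default=-1)
--     return assignment
-- ===== Notes on version B (the rewrite author's own statement) =====
-- stated objective: alternative
-- what changed: Drops the grouping dict of label lists and Counter.most_common: B keeps only the flat (path,label) pair list and, at each path's first occurrence, re-scans that list to collect the path's non-(-1) labels, dedups them in order, and picks the winner with max(cands, key=labs.count, default=-1).
import Mathlib
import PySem

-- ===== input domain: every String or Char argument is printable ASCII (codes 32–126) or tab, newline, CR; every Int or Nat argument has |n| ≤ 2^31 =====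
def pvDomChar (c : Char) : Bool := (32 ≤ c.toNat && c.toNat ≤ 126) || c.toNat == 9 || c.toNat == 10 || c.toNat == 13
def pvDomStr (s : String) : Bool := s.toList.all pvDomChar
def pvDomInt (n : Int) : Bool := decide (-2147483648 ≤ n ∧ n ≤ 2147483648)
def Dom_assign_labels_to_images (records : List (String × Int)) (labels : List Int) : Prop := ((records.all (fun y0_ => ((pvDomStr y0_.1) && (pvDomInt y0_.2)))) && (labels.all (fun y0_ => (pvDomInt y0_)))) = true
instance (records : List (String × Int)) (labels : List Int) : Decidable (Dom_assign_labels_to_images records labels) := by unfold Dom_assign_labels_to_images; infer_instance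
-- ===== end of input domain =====

-- B drops A's grouping dict of per-path label lists and Counter.most_common: it keeps only the
-- flat (path, label) pair list and, at each path's first occurrence, re-scans that list for the
-- path's non-(-1) labels, dedups them in order and takes max(cands, key=labs.count, default=-1).

-- ===== PORT A =====
-- by_image.setdefault(path, []).append(lab) ported as modify path [] (· ++ [lab]) (exact:
-- registers an absent key at the end, keeps position and appends otherwise).
-- Counter(filtered).most_common(1)[0][0] ported as the head of the stable reverse sort of the
-- counter's items by count (CPython documents most_common as sorted(items, key=count, reverse=True));
-- the filtered ≠ [] guard makes the [0] safe, as in the Python.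
def assign_labels_to_images (records : List (String × Int)) (labels : List Int) : List (String × Int) :=
  let by_image : PySem.Dict String (List Int) :=
    (records.zip labels).foldl
      (fun d q => d.modify q.1.1 [] (fun ls => ls ++ [q.2])) PySem.Dict.empty
  let assignment : PySem.Dict String Int :=
    by_image.items.foldl
      (fun a pi =>
        let filtered := pi.2.filter (fun l => decide (l ≠ -1))
        if filtered ≠ [] then
          a.insert pi.1 ((PySem.List.sorted (PySem.Dict.counter filtered).items (fun p => p.2) true).headD (0, 0)).1
        else
          a.insert pi.1 (-1))
      PySem.Dict.empty
  assignment.items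

-- ===== PORT B =====
-- list(dict.fromkeys(labs)) is PySem.List.dedup; max(cands, key=labs.count, default=-1) is
-- PySem.List.maxD with key the count in labs; 'if path in assignment: continue' is the
-- contains-guarded fold step.
def assign_labels_to_images_alt (records : List (String × Int)) (labels : List Int) : List (String × Int) :=
  let pairs : List (String × Int) := (records.zip labels).map (fun q => (q.1.1, q.2))
  let assignment : PySem.Dict String Int :=
    pairs.foldl
      (fun a pq =>
        if a.contains pq.1 then a
        else
          let labs := (pairs.filter (fun r => r.1 == pq.1 && decide (r.2 ≠ -1))).map (fun r => r.2)
          let cands := PySem.List.dedup labs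
          a.insert pq.1 (PySem.List.maxD cands (fun l => labs.count l) (-1)))
      PySem.Dict.empty
  assignment.items

-- ===== PRECONDITION & SPEC =====
def Spec_assign_labels_to_images (records : List (String × Int)) (labels : List Int) (out : List (String × Int)) : Prop := out = assign_labels_to_images_alt records labels
instance (records : List (String × Int)) (labels : List Int) (out : List (String × Int)) : Decidable (Spec_assign_labels_to_images records labels out) := by unfold Spec_assign_labels_to_images; infer_instance

-- ===== CLAIM (what is proved, stated in full; the proofs are below) =====
def Claim_equal_assign_labels_to_images : Prop := ∀ (records : List (String × Int)) (labels : List Int), Dom_assign_labels_to_images records labels → Spec_assign_labels_to_images records labels (assign_labels_to_images records labels)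

-- ===== LEMMAS AND PROOFS =====

-- A's per-path value: most_common(1)[0][0] of the filtered labels, or -1.
def aVal (labs : List Int) : Int :=
  let filtered := labs.filter (fun l => decide (l ≠ -1))
  if filtered ≠ [] then
    ((PySem.List.sorted (PySem.Dict.counter filtered).items (fun p => p.2) true).headD (0, 0)).1
  else -1

-- B's per-path value: max over the ordered dedup of the filtered labels, keyed by count.
def bVal (F : List Int) : Int :=
  PySem.List.maxD (PySem.List.dedup F) (fun l => F.count l) (-1)

-- Head of the insertion-sort fold (reverse order by snd) is the strict-greater argmax fold.
lemma head_foldl_insertBy (t : List (Int × Int)) :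
    ∀ (b : Int × Int) (rest : List (Int × Int)),
      (t.foldl (fun acc x => PySem.List.insertBy (fun a b => decide (b.2 < a.2)) x acc) (b :: rest)).head? =
      some (t.foldl (fun best q => if best.2 < q.2 then q else best) b) := by
  induction t with
  | nil => intro b rest; rfl
  | cons x t ih =>
    intro b rest
    simp only [List.foldl_cons, PySem.List.insertBy]
    by_cases h : b.2 < x.2
    · simp only [h, decide_true, if_true, ih]
    · simp only [h, decide_false, Bool.false_eq_true, if_false, ih]

-- Python's max with a key on a nonempty list is the strict-greater argmax fold.
lemma max?_cons (key : Int → Nat) (x : Int) (t : List Int) :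
    PySem.List.max? (x :: t) key = some (t.foldl (fun b q => if key b < key q then q else b) x) := by
  induction t generalizing x with
  | nil => rfl
  | cons y t ih =>
    have h1 : PySem.List.max? (x :: y :: t) key = PySem.List.max? ((if key x < key y then y else x) :: t) key := by
      simp only [PySem.List.max?, List.foldl_cons]
      by_cases h : key x < key y <;> simp [h]
    rw [h1, ih]
    simp only [List.foldl_cons]

-- A pair fold by snd over (k, f k) pairs is the key fold over the keys.
lemma foldl_pair_snd (f : Int → Int) (ks : List Int) :
    ∀ x0 : Int,
      (ks.map (fun k => (k, f k))).foldl (fun b q => if b.2 < q.2 then q else b) (x0, f x0) =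
      (ks.foldl (fun b q => if f b < f q then q else b) x0,
       f (ks.foldl (fun b q => if f b < f q then q else b) x0)) := by
  induction ks with
  | nil => intro x0; rfl
  | cons k ks ih =>
    intro x0
    simp only [List.map_cons, List.foldl_cons]
    by_cases h : f x0 < f k
    · simp only [h, if_true, ih]
    · simp only [h, if_false, ih]

-- The crux: A's most_common pick equals B's max-by-count over the ordered dedup.
lemma aVal_eq_bVal (labs : List Int) :
    aVal labs = bVal (labs.filter (fun l => decide (l ≠ -1))) := by
  rcases hFe : labs.filter (fun l => decide (l ≠ -1)) with _ | ⟨x, tF⟩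
  · simp only [aVal, bVal]
    rw [hFe]
    rfl
  · set F := x :: tF with hF
    -- the ordered dedup is nonempty: it starts with x
    have hded : PySem.List.dedup F = x :: PySem.Set.discard (PySem.Set.ofList tF) x := by
      rw [PySem.List.dedup_eq_ofList, hF, PySem.Set.ofList_cons]
    set crest := PySem.Set.discard (PySem.Set.ofList tF) x with hcrest
    -- A's side: head of the stable reverse sort of the counter's items
    have hitems : (PySem.Dict.counter F).items =
        (x :: crest).map (fun k => (k, (F.count k : Int))) := by
      rw [PySem.Dict.items_counter, hF, PySem.Set.ofList_cons, ← hcrest, ← hF]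
    have hA : (PySem.List.sorted (PySem.Dict.counter F).items (fun p => p.2) true).headD (0, 0) =
        (crest.map (fun k => (k, (F.count k : Int)))).foldl
          (fun best q => if best.2 < q.2 then q else best) (x, (F.count x : Int)) := by
      rw [List.headD_eq_head?_getD, PySem.List.sorted_rev_eq_foldl_insertBy, hitems]
      simp only [List.map_cons, List.foldl_cons]
      have h0 : PySem.List.insertBy (fun a b : Int × Int => decide (b.2 < a.2))
          (x, (F.count x : Int)) [] = [(x, (F.count x : Int))] := by
        simp [PySem.List.insertBy]
      rw [h0, head_foldl_insertBy]
      rfl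
    -- B's side: maxD over the dedup
    have hB : bVal F =
        crest.foldl (fun b q => if F.count b < F.count q then q else b) x := by
      unfold bVal
      rw [hded]
      simp only [PySem.List.maxD]
      rw [max?_cons]
      exact Option.getD_some
    simp only [aVal]
    rw [hFe, if_pos (by simp [hF]), hA, hB]
    rw [foldl_pair_snd (fun k => (F.count k : Int)) crest x]
    -- the outer .1 picks the key; the Int-cast key fold equals the Nat key fold
    have hcast : ∀ (cs : List Int) (x0 : Int),
        cs.foldl (fun b q => if (F.count b : Int) < (F.count q : Int) then q else b) x0 =
        cs.foldl (fun b q => if F.count b < F.count q then q else b) x0 := by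
      intro cs x0
      simp only [Int.ofNat_lt]
    exact hcast crest x

-- A's grouping loop: the per-path label list is the projected filtered labels.
lemma by_image_getD (l : List ((String × Int) × Int)) (p : String) :
    (l.foldl (fun d q => d.modify q.1.1 [] (fun ls => ls ++ [q.2])) PySem.Dict.empty).getD p []
    = (l.filter (fun q => q.1.1 == p)).map (fun q => q.2) := by
  have hmap : l.foldl (fun d q => d.modify q.1.1 [] (fun ls => ls ++ [q.2])) PySem.Dict.empty
      = (l.map (fun q => (q.1.1, q.2))).foldl (fun d r => d.modify r.1 [] (fun ls => ls ++ [r.2])) PySem.Dict.empty := by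
    rw [List.foldl_map]
  rw [hmap, PySem.Dict.getD_foldl_modify_append, PySem.Dict.getD_empty, List.nil_append,
    List.filter_map, List.map_map]
  rfl

-- Filtering through a discard of k is plain filtering when the filter refuses k.
lemma filter_discard (s : List String) (k : String) (p : String → Bool) (hk : p k = false) :
    (PySem.Set.discard s k).filter p = s.filter p := by
  simp only [PySem.Set.discard, List.filter_filter]
  apply List.filter_congr
  intro y _
  by_cases hy : y = k
  · subst hy; simp [hk]
  · simp [hy]

-- B's 'if path in assignment: continue' loop: items are the first occurrences that survive d,
-- each paired with its (position-independent) value.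
lemma foldl_guard_insert (v : String → Int) (ks : List String) :
    ∀ d : PySem.Dict String Int, d.keys.Nodup →
      (ks.foldl (fun a k => if a.contains k then a else a.insert k (v k)) d).items =
      d.items ++ ((PySem.Set.ofList ks).filter (fun k => !(d.contains k))).map (fun k => (k, v k)) := by
  induction ks with
  | nil => intro d _; simp [PySem.Set.ofList]
  | cons k ks ih =>
    intro d hnd
    simp only [List.foldl_cons, PySem.Set.ofList_cons]
    by_cases hc : d.contains k = true
    · rw [if_pos hc, ih d hnd, List.filter_cons]
      simp only [hc, Bool.not_true, Bool.false_eq_true, if_false]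
      rw [filter_discard _ _ _ (by simp [hc])]
    · have hc' : d.contains k = false := by revert hc; cases d.contains k <;> simp
      rw [if_neg (by simp [hc']), ih _ (PySem.Dict.nodup_keys_insert d k (v k) hnd),
        PySem.Dict.items_insert_of_not_contains d (v k) hc', List.filter_cons]
      simp only [hc', Bool.not_false, if_pos, List.map_cons, List.append_assoc, List.cons_append,
        List.nil_append]
      congr 1
      congr 1
      have hfc : ∀ y, ((d.insert k (v k)).contains y) = (y == k || d.contains y) :=
        fun y => PySem.Dict.contains_insert d k y (v k)
      rw [← filter_discard (PySem.Set.ofList ks) k (fun y => !(d.insert k (v k)).contains y)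
        (by simp [hfc])]
      refine congrArg (List.map _) (List.filter_congr ?_)
      intro y hy
      have hyk : (y == k) = false := by
        simp only [PySem.Set.discard, List.mem_filter] at hy
        simpa using hy.2
      simp [hfc, hyk]

-- ===== VERDICT (by name: the statement is the Claim_ definition above) =====
theorem assign_labels_to_images_spec : Claim_equal_assign_labels_to_images := by
  intro records labels _
  unfold Spec_assign_labels_to_images assign_labels_to_images assign_labels_to_images_alt
  simp only []
  set l := records.zip labels with hl
  set byim := l.foldl (fun d q => d.modify q.1.1 [] (fun ls => ls ++ [q.2]))
      (PySem.Dict.empty : PySem.Dict String (List Int)) with hbyim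
  set pairs := l.map (fun q => (q.1.1, q.2)) with hpairs
  -- B's per-path value, as a function of the path alone
  set v : String → Int := fun p =>
      PySem.List.maxD
        (PySem.List.dedup ((pairs.filter (fun r => r.1 == p && decide (r.2 ≠ -1))).map (fun r => r.2)))
        (fun a => ((pairs.filter (fun r => r.1 == p && decide (r.2 ≠ -1))).map (fun r => r.2)).count a)
        (-1) with hv
  -- A's keys: first-occurrence paths
  have hKA : byim.keys = PySem.Set.update [] (l.map (fun q => q.1.1)) := by
    rw [hbyim, PySem.Dict.keys_foldl_modify_key l (fun q => q.1.1) [] (fun _ q => fun ls => ls ++ [q.2]),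
      PySem.Dict.keys_empty]
  have hndA : byim.keys.Nodup := by
    rw [hbyim]
    exact PySem.Dict.nodup_keys_foldl_modify_key l (fun q => q.1.1) [] _ _ (by simp [PySem.Dict.keys_empty])
  -- A's assignment loop appends one fresh item per key
  have hstepA : (fun (a : PySem.Dict String Int) (pi : String × List Int) =>
      let filtered := pi.2.filter (fun l => decide (l ≠ -1))
      if filtered ≠ [] then
        a.insert pi.1 ((PySem.List.sorted (PySem.Dict.counter filtered).items (fun p => p.2) true).headD (0, 0)).1
      else a.insert pi.1 (-1))
      = (fun a pi => a.insert pi.1 (aVal pi.2)) := by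
    funext a pi
    simp only [aVal]
    split <;> rfl
  have hitemsA : (byim.items.foldl
      (fun a pi =>
        let filtered := pi.2.filter (fun l => decide (l ≠ -1))
        if filtered ≠ [] then
          a.insert pi.1 ((PySem.List.sorted (PySem.Dict.counter filtered).items (fun p => p.2) true).headD (0, 0)).1
        else a.insert pi.1 (-1)) PySem.Dict.empty).items
      = byim.items.map (fun pi => (pi.1, aVal pi.2)) := by
    rw [hstepA]
    have := PySem.Dict.items_foldl_insert_fresh byim.items (fun pi => pi.1) (fun pi => aVal pi.2)
      PySem.Dict.empty (fun a _ => PySem.Dict.contains_empty _)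
      (by simpa [PySem.Dict.keys] using hndA)
    simpa using this
  -- B's loop: a guarded fold over the path projection of the pairs
  have hstepB : pairs.foldl
      (fun a pq =>
        if a.contains pq.1 then a
        else
          let labs := (pairs.filter (fun r => r.1 == pq.1 && decide (r.2 ≠ -1))).map (fun r => r.2)
          let cands := PySem.List.dedup labs
          a.insert pq.1 (PySem.List.maxD cands (fun a => labs.count a) (-1)))
      PySem.Dict.empty
      = (pairs.map Prod.fst).foldl (fun a k => if a.contains k then a else a.insert k (v k))
          PySem.Dict.empty := by
    simp only [hv, hpairs, List.foldl_map]
  have hitemsB : ((pairs.map Prod.fst).foldl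
      (fun a k => if a.contains k then a else a.insert k (v k)) PySem.Dict.empty).items
      = (PySem.Set.ofList (pairs.map Prod.fst)).map (fun k => (k, v k)) := by
    rw [foldl_guard_insert v (pairs.map Prod.fst) PySem.Dict.empty
      (by simp [PySem.Dict.keys_empty])]
    simp [PySem.Dict.empty, List.filter_true]
  rw [hitemsA, hstepB, hitemsB]
  rw [PySem.Dict.items_eq_map_keys byim hndA [], List.map_map]
  have hproj : pairs.map Prod.fst = l.map (fun q => q.1.1) := by
    rw [hpairs, List.map_map]; rfl
  rw [hKA, hproj, ← PySem.Set.update_nil_left]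
  apply List.map_congr_left
  intro p _
  simp only [Function.comp]
  have h1 : byim.getD p [] = (l.filter (fun q => q.1.1 == p)).map (fun q => q.2) := by
    rw [hbyim]; exact by_image_getD l p
  -- B's labs are A's grouped labels with the -1s filtered out
  have h2 : (pairs.filter (fun r => r.1 == p && decide (r.2 ≠ -1))).map (fun r => r.2)
      = ((l.filter (fun q => q.1.1 == p)).map (fun q => q.2)).filter (fun x => decide (x ≠ -1)) := by
    rw [hpairs, List.filter_map, List.map_map, List.filter_map, List.filter_filter]
    simp only [Function.comp_def]
    congr 1
    apply List.filter_congr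
    intro a _
    exact Bool.and_comm _ _
  have h3 : v p = bVal (((l.filter (fun q => q.1.1 == p)).map (fun q => q.2)).filter (fun x => decide (x ≠ -1))) := by
    rw [hv]
    simp only [bVal, h2]
  rw [h1, h3, ← aVal_eq_bVal]
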